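-- pv_equiv track=rewrite | github.com/eellak/glossAPI | text_extraction_cleaning/New_parargraph_cleaning_tools.py | all_paragraph_not_char_end
-- ===== SOURCE A (Python) =====
-- def paragraph_not_char_end(paragraph,chars,print) :
--     #if not paragraph.startswith('##') :
--     end_search_flag = False
--     if not paragraph.endswith(chars) :
--         if print :
--             paragraph = '[Out:Paragraph does not end with specified char]' + paragraph
--         else : paragraph = ''
--         end_search_flag = True
--     return (paragraph,end_search_flag)
--
-- def all_paragraph_not_char_end(paragraphs,chars,print = False) :
--     newparagraphs = []
--     for i,paragraph in enumerate(paragraphs) :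
--         newparagraphs.append(paragraph_not_char_end(paragraph,chars,print)[0])
--         if paragraph_not_char_end(paragraph,chars,print)[1] == False :
--             for t_paragraph in paragraphs[i+1:] :
--                 newparagraphs.append(t_paragraph)
--             return newparagraphs
--     return newparagraphs
-- ===== SOURCE B (Python) =====
-- def all_paragraph_not_char_end(paragraphs, chars, print=False):
--     # boundary-finding pass, then two shaped passes: transformed prefix + verbatim suffix
--     idx = next((i for i, p in enumerate(paragraphs) if p.endswith(chars)), len(paragraphs))
--     if print:
--         transform = lambda p: '[Out:Paragraph does not end with specified char]' + p
--     else: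
--         transform = lambda p: ''
--     return [transform(p) for p in paragraphs[:idx]] + list(paragraphs[idx:])
-- ===== Notes on version B (the rewrite author's own statement) =====
-- stated objective: alternative
-- what changed: Replaces A's interleaved transform/early-return loop (which re-tests each paragraph twice via a helper) with a boundary-finding pass (first paragraph ending with chars) followed by a map over the prefix slice and a verbatim copy of the suffix slice.
import Mathlib
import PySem

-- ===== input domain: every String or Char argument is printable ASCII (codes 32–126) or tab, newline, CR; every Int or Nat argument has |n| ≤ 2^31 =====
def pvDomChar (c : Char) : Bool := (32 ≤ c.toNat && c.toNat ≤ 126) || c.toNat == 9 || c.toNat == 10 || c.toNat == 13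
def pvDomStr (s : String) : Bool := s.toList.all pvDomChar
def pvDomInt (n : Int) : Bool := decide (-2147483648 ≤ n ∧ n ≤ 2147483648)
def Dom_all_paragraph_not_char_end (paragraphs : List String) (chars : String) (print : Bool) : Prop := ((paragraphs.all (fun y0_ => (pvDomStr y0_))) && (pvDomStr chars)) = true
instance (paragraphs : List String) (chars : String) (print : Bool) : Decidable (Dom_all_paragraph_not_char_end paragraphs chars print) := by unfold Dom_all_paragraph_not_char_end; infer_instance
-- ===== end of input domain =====

-- ===== PORT A =====
-- Return-value equivalence only; header: B differs in decomposition (boundary index + two slice passes), objective: alternative.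
def paragraph_not_char_end (paragraph : String) (chars : String) (print : Bool) : String × Bool :=
  if ¬ PySem.Str.endswith paragraph chars then
    (if print then "[Out:Paragraph does not end with specified char]" ++ paragraph else "", true)
  else
    (paragraph, false)

def pvALoop (chars : String) (print : Bool) : List String → List String
  | [] => []
  | paragraph :: rest =>
    if (paragraph_not_char_end paragraph chars print).2 = false then
      (paragraph_not_char_end paragraph chars print).1 :: rest
    else
      (paragraph_not_char_end paragraph chars print).1 :: pvALoop chars print rest

def all_paragraph_not_char_end (paragraphs : List String) (chars : String) (print : Bool) : List String :=
  pvALoop chars print paragraphs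

-- ===== PORT B =====
def pvTransform (print : Bool) (p : String) : String :=
  if print then "[Out:Paragraph does not end with specified char]" ++ p else ""

def all_paragraph_not_char_end_alt (paragraphs : List String) (chars : String) (print : Bool) : List String :=
  let idx := (List.findIdx? (fun p => PySem.Str.endswith p chars) paragraphs).getD paragraphs.length
  (paragraphs.take idx).map (pvTransform print) ++ paragraphs.drop idx

-- ===== PRECONDITION & SPEC =====
def Spec_all_paragraph_not_char_end (paragraphs : List String) (chars : String) (print : Bool) (out : List String) : Prop := out = all_paragraph_not_char_end_alt paragraphs chars print
instance (paragraphs : List String) (chars : String) (print : Bool) (out : List String) : Decidable (Spec_all_paragraph_not_char_end paragraphs chars print out) := by unfold Spec_all_paragraph_not_char_end; infer_instance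

-- ===== CLAIM =====
def Claim_equal_all_paragraph_not_char_end : Prop := ∀ (paragraphs : List String) (chars : String) (print : Bool), Dom_all_paragraph_not_char_end paragraphs chars print → Spec_all_paragraph_not_char_end paragraphs chars print (all_paragraph_not_char_end paragraphs chars print)

-- ===== LEMMAS AND PROOFS =====
theorem alt_cons_pos (p : String) (rest : List String) (chars : String) (print : Bool)
    (h : PySem.Str.endswith p chars = true) :
    all_paragraph_not_char_end_alt (p :: rest) chars print = p :: rest := by
  simp only [PySem.Str.endswith] at h
  simp [all_paragraph_not_char_end_alt, List.findIdx?_cons, h]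

theorem alt_cons_neg (p : String) (rest : List String) (chars : String) (print : Bool)
    (h : PySem.Str.endswith p chars = false) :
    all_paragraph_not_char_end_alt (p :: rest) chars print =
      pvTransform print p :: all_paragraph_not_char_end_alt rest chars print := by
  simp only [PySem.Str.endswith] at h
  simp only [all_paragraph_not_char_end_alt, List.findIdx?_cons]
  cases hf : List.findIdx? (fun q => PySem.Str.endswith q chars) rest with
  | none => simp [h]
  | some j => simp [h, List.take_succ_cons, List.drop_succ_cons]

theorem ports_agree (chars : String) (print : Bool) (paragraphs : List String) :
    all_paragraph_not_char_end paragraphs chars print =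
      all_paragraph_not_char_end_alt paragraphs chars print := by
  induction paragraphs with
  | nil => simp [all_paragraph_not_char_end, pvALoop, all_paragraph_not_char_end_alt]
  | cons p rest ih =>
    by_cases h : PySem.Str.endswith p chars = true
    · rw [alt_cons_pos p rest chars print h]
      simp only [PySem.Str.endswith] at h
      simp [all_paragraph_not_char_end, pvALoop, paragraph_not_char_end, h]
    · rw [alt_cons_neg p rest chars print (by simpa using h)]
      replace h : PySem.Chars.endswith p.toList chars.toList = false := by
        simpa [PySem.Str.endswith] using h
      simp [all_paragraph_not_char_end, pvALoop, paragraph_not_char_end, h, pvTransform, ih,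
        all_paragraph_not_char_end] at *
      simpa [all_paragraph_not_char_end] using ih

-- ===== VERDICT =====
theorem all_paragraph_not_char_end_spec : Claim_equal_all_paragraph_not_char_end := by
  intro paragraphs chars print _
  unfold Spec_all_paragraph_not_char_end
  exact ports_agree chars print paragraphs
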